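-- pv_equiv track=rewrite | github.com/tallzilla/crossplay-tournament | engine/real_risk.py | _check_crosswords_fast
-- ===== SOURCE A (Python) =====
-- def _check_crosswords_fast(word, start, positions_needed, cross_valid):
--     """Fast crossword check using precomputed valid letter sets.
--
--     cross_valid: dict mapping position -> set of valid letters
--     """
--     for i, letter in enumerate(word):
--         pos = start + i
--         if pos not in positions_needed:
--             continue
--         if pos in cross_valid and letter not in cross_valid[pos]:
--             return False
--     return True
-- ===== SOURCE B (Python) =====
-- def _check_crosswords_fast(word, start, positions_needed, cross_valid):
--     """Drive the scan by the needed positions instead of the word's letters."""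
--     n = len(word)
--     for pos in positions_needed:
--         if pos in cross_valid and 0 <= pos - start < n:
--             if word[pos - start] not in cross_valid[pos]:
--                 return False
--     return True
-- ===== Notes on version B (the rewrite author's own statement) =====
-- stated objective: alternative
-- what changed: B iterates over positions_needed and indexes into the word, instead of A's scan over every letter of the word with a membership test against positions_needed; the 'pos not in positions_needed' guard disappears.
import Mathlib
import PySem

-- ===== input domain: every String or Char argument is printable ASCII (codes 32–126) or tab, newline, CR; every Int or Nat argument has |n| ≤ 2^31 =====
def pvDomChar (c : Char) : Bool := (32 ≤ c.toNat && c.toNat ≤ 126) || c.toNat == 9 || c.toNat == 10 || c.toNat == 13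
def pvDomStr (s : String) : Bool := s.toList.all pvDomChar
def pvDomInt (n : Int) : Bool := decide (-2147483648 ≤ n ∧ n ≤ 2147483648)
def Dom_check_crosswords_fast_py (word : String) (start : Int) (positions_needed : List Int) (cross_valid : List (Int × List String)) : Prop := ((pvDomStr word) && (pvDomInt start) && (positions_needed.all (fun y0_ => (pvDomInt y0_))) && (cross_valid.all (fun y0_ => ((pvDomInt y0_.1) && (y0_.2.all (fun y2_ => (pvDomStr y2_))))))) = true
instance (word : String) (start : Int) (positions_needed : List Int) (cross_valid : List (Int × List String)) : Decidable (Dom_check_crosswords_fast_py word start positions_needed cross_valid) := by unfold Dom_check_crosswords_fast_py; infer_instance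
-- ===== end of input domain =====

-- B replaces A's scan over every letter of the word (with a membership test against
-- positions_needed) by a loop over positions_needed that indexes into the word; alternative decomposition, same results.

-- dict lookup (first match, per the association-list convention); shared by both ports
def cvLookup : List (Int × List String) → Int → Option (List String)
  | [], _ => none
  | (k, v) :: rest, pos => if k == pos then some v else cvLookup rest pos

-- ===== PORT A =====
-- the 'for i, letter in enumerate(word)' loop with early return False
def aLoop (start : Int) (pn : List Int) (cv : List (Int × List String)) : List (Int × Char) → Bool
  | [] => true
  | (i, letter) :: rest =>
    let pos := start + i
    if !(pn.contains pos) then aLoop start pn cv rest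
    else
      match cvLookup cv pos with
      | some valid =>
        if !(valid.contains (String.mk [letter])) then false else aLoop start pn cv rest
      | none => aLoop start pn cv rest

def check_crosswords_fast_py (word : String) (start : Int) (positions_needed : List Int) (cross_valid : List (Int × List String)) : Bool :=
  aLoop start positions_needed cross_valid (PySem.List.enumerate word.toList)

-- ===== PORT B =====
-- the 'for pos in positions_needed' loop of Source B
def bLoop (word : List Char) (start : Int) (cv : List (Int × List String)) : List Int → Bool
  | [] => true
  | pos :: rest =>
    match cvLookup cv pos with
    | some valid =>
      if 0 ≤ pos - start && pos - start < (word.length : Int) then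
        match PySem.List.pyGet? word (pos - start) with
        | some letter =>
          if !(valid.contains (String.mk [letter])) then false else bLoop word start cv rest
        | none => bLoop word start cv rest   -- unreachable: index is in range
      else bLoop word start cv rest
    | none => bLoop word start cv rest

def check_crosswords_fast_py_alt (word : String) (start : Int) (positions_needed : List Int) (cross_valid : List (Int × List String)) : Bool :=
  bLoop word.toList start cross_valid positions_needed

-- ===== PRECONDITION & SPEC =====
def Spec_check_crosswords_fast_py (word : String) (start : Int) (positions_needed : List Int) (cross_valid : List (Int × List String)) (out : Bool) : Prop := out = check_crosswords_fast_py_alt word start positions_needed cross_valid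
instance (word : String) (start : Int) (positions_needed : List Int) (cross_valid : List (Int × List String)) (out : Bool) : Decidable (Spec_check_crosswords_fast_py word start positions_needed cross_valid out) := by unfold Spec_check_crosswords_fast_py; infer_instance

-- ===== CLAIM (what is proved, stated in full; the proofs are below) =====
def Claim_equal_check_crosswords_fast_py : Prop := ∀ (word : String) (start : Int) (positions_needed : List Int) (cross_valid : List (Int × List String)), Dom_check_crosswords_fast_py word start positions_needed cross_valid → Spec_check_crosswords_fast_py word start positions_needed cross_valid (check_crosswords_fast_py word start positions_needed cross_valid)

-- ===== LEMMAS AND PROOFS =====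

-- the bad-position test, seen from A's side (argument: one enumerated (index, letter) pair)
def fA (start : Int) (pn : List Int) (cv : List (Int × List String)) (p : Int × Char) : Bool :=
  !(pn.contains (start + p.1) &&
     (match cvLookup cv (start + p.1) with
      | some valid => !(valid.contains (String.mk [p.2]))
      | none => false))

-- the bad-position test, seen from B's side (argument: one needed position)
def gB (word : List Char) (start : Int) (cv : List (Int × List String)) (pos : Int) : Bool :=
  match cvLookup cv pos with
  | some valid =>
    if 0 ≤ pos - start && pos - start < (word.length : Int) then
      match PySem.List.pyGet? word (pos - start) with
      | some letter => valid.contains (String.mk [letter])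
      | none => true
    else true
  | none => true

theorem aLoop_eq_all (start : Int) (pn : List Int) (cv : List (Int × List String)) (l : List (Int × Char)) :
    aLoop start pn cv l = l.all (fA start pn cv) := by
  induction l with
  | nil => rfl
  | cons p rest ih =>
    obtain ⟨i, c⟩ := p
    by_cases h : (start + i) ∈ pn
    · have hcont : pn.contains (start + i) = true := by simpa using h
      cases hcv : cvLookup cv (start + i) with
      | none => simp [aLoop, hcont, hcv, fA, h, ih]
      | some valid =>
        by_cases hm : String.mk [c] ∈ valid
        · simp [aLoop, hcont, hcv, fA, h, hm, ih]
        · simp [aLoop, hcont, hcv, fA, h, hm]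
    · have hcont : pn.contains (start + i) = false := by simpa using h
      simp [aLoop, hcont, fA, h, ih]

theorem bLoop_eq_all (word : List Char) (start : Int) (cv : List (Int × List String)) (pn : List Int) :
    bLoop word start cv pn = pn.all (gB word start cv) := by
  induction pn with
  | nil => rfl
  | cons pos rest ih =>
    simp only [bLoop, List.all_cons, gB]
    cases hcv : cvLookup cv pos with
    | none => dsimp only; rw [ih]; simp
    | some valid =>
      dsimp only
      by_cases hr : (0 ≤ pos - start && pos - start < (word.length : Int)) = true
      · rw [if_pos hr, if_pos hr]
        cases hg : PySem.List.pyGet? word (pos - start) with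
        | none => dsimp only; rw [ih]; simp
        | some letter =>
          dsimp only
          by_cases hc : (valid.contains (String.mk [letter])) = true
          · rw [if_neg (by rw [hc]; simp), ih, hc, Bool.true_and]
          · have hc' : valid.contains (String.mk [letter]) = false :=
              Bool.eq_false_iff.mpr hc
            rw [if_pos (by rw [hc']; rfl), hc', Bool.false_and]
      · rw [if_neg hr, if_neg hr, ih, Bool.true_and]

theorem all_fA_iff_all_gB (word : List Char) (start : Int) (pn : List Int) (cv : List (Int × List String)) :
    (PySem.List.enumerate word).all (fA start pn cv) = pn.all (gB word start cv) := by
  rcases hall : (PySem.List.enumerate word).all (fA start pn cv) with _ | _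
  · -- A found a violation: produce it on B's side
    rw [List.all_eq_false] at hall
    obtain ⟨p, hmem, hfp⟩ := hall
    rw [PySem.List.mem_enumerate_iff] at hmem
    obtain ⟨k, hk, rfl⟩ := hmem
    have hfp' : fA start pn cv ((0 : Int) + (k : Int), word[k]) = false := by
      revert hfp; cases fA start pn cv ((0 : Int) + (k : Int), word[k]) <;> simp
    simp only [fA, Bool.not_eq_false', Bool.and_eq_true] at hfp'
    obtain ⟨hpn, hmatch⟩ := hfp'
    symm
    rw [List.all_eq_false]
    refine ⟨start + (0 + (k : Int)), by simpa using List.contains_iff_mem.mp hpn, ?_⟩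
    cases hcv : cvLookup cv (start + (0 + (k : Int))) with
    | none => rw [hcv] at hmatch; simp at hmatch
    | some valid =>
      rw [hcv] at hmatch
      simp only [Bool.not_eq_eq_eq_not, Bool.not_false] at hmatch
      have hsub : start + (0 + (k : Int)) - start = (k : Int) := by ring
      have hget : PySem.List.pyGet? word ((k : Int)) = some word[k] :=
        PySem.List.pyGet?_ofNat word k hk
      simp only [gB, hcv, hsub]
      rw [if_pos (by simp; omega), hget]
      simpa using hmatch
  · -- no violation on A's side: none on B's side either
    rw [List.all_eq_true] at hall
    symm
    rw [List.all_eq_true]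
    intro pos hpos
    unfold gB
    cases hcv : cvLookup cv pos with
    | none => rfl
    | some valid =>
      by_cases hr : (0 ≤ pos - start && pos - start < (word.length : Int)) = true
      · simp only [hr, if_pos]
        simp only [Bool.and_eq_true, decide_eq_true_eq] at hr
        obtain ⟨h0, hl⟩ := hr
        set k : Nat := (pos - start).toNat with hkdef
        have hk : k < word.length := by omega
        have hcast : ((k : Int)) = pos - start := by omega
        have hget : PySem.List.pyGet? word (pos - start) = some word[k] := by
          rw [← hcast]; exact PySem.List.pyGet?_ofNat word k hk
        rw [hget]
        have hmemE : ((0 : Int) + (k : Int), word[k]) ∈ PySem.List.enumerate word := by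
          rw [PySem.List.mem_enumerate_iff]; exact ⟨k, hk, rfl⟩
        have := hall _ hmemE
        simp only [fA] at this
        have hpos' : start + ((0 : Int) + (k : Int)) = pos := by omega
        rw [hpos'] at this
        have hpn : pn.contains pos = true := List.contains_iff_mem.mpr hpos
        rw [hpn, hcv] at this
        simpa using this
      · simp only [hcv]
        rw [if_neg hr]

-- ===== VERDICT (by name: the statement is the Claim_ definition above) =====
theorem check_crosswords_fast_py_spec : Claim_equal_check_crosswords_fast_py := by
  intro word start pn cv _
  unfold Spec_check_crosswords_fast_py check_crosswords_fast_py check_crosswords_fast_py_alt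
  rw [aLoop_eq_all, bLoop_eq_all, all_fA_iff_all_gB]
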